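-- pv_equiv track=rewrite | github.com/Othniel-Amos/Student_Chart | functions.py | safely_add_subjects
-- ===== SOURCE A (Python) =====
-- def safely_add_subjects(subjects):
--     num_subjects = len(subjects)
--     counter = 0
--     placeholder = ""
--     for _ in subjects:
--         counter+=1
--         if counter == num_subjects:
--             placeholder+="?"
--         else:
--             placeholder+="?,"
--
--     return placeholder
-- ===== SOURCE B (Python) =====
-- def safely_add_subjects(subjects):
--     n = len(subjects)
--     if n == 0:
--         return ""
--     return "?" + ",?" * (n - 1)
-- ===== Notes on version B (the rewrite author's own statement) =====
-- stated objective: idiomatic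
-- what changed: Replaced the counting loop with last-element detection by a closed-form string construction from len(subjects): '?' + ',?' * (n - 1), with an explicit empty-list guard.
import Mathlib
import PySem

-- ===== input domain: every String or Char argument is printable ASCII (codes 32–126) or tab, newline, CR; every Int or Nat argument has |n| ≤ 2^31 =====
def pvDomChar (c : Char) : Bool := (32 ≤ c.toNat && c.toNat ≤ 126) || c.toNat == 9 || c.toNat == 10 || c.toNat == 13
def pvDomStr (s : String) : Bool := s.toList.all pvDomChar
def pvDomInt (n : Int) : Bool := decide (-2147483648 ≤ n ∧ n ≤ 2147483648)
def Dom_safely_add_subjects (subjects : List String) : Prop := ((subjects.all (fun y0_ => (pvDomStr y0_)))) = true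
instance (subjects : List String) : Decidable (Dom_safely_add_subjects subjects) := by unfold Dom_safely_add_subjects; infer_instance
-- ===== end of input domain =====

-- B replaces A's counting loop by the closed form "?" ++ ",?" * (n-1) from n = len(subjects) (idiomatic; same cost).

-- ===== PORT A =====
def safely_add_subjects (subjects : List String) : String :=
  let num_subjects : Int := subjects.length
  let st := subjects.foldl
    (fun (st : Int × String) (_ : String) =>
      let counter := st.1 + 1
      let placeholder := if counter = num_subjects then st.2 ++ "?" else st.2 ++ "?,"
      (counter, placeholder)) (0, "")
  st.2

-- ===== PORT B =====
-- string repetition s * k (Python's str * int for nonnegative k)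
def strMul (s : String) : Nat → String
  | 0 => ""
  | k + 1 => s ++ strMul s k

def safely_add_subjects_alt (subjects : List String) : String :=
  let n := subjects.length
  if n = 0 then "" else "?" ++ strMul ",?" (n - 1)

-- ===== PRECONDITION & SPEC =====
def Spec_safely_add_subjects (subjects : List String) (out : String) : Prop := out = safely_add_subjects_alt subjects
instance (subjects : List String) (out : String) : Decidable (Spec_safely_add_subjects subjects out) := by unfold Spec_safely_add_subjects; infer_instance

-- ===== CLAIM (what is proved, stated in full; the proofs are below) =====
def Claim_equal_safely_add_subjects : Prop := ∀ (subjects : List String), Dom_safely_add_subjects subjects → Spec_safely_add_subjects subjects (safely_add_subjects subjects)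

-- ===== LEMMAS AND PROOFS =====

-- characterisation of A's fold: correct whenever n = c + length of the remaining list
theorem foldA_char (l : List String) : ∀ (c n : Int) (p : String), n = c + l.length →
    (l.foldl
      (fun (st : Int × String) (_ : String) =>
        let counter := st.1 + 1
        let placeholder := if counter = n then st.2 ++ "?" else st.2 ++ "?,"
        (counter, placeholder)) (c, p)).2
    = if l.length = 0 then p else p ++ strMul "?," (l.length - 1) ++ "?" := by
  induction l with
  | nil => intro c n p h; simp
  | cons x xs ih =>
    intro c n p h
    simp only [List.foldl_cons, List.length_cons] at *
    cases xs with
    | nil =>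
      have hc : c + 1 = n := by simp at h; omega
      simp [hc, strMul]
    | cons y ys =>
      have hc : ¬ (c + 1 = n) := by simp at h ⊢; omega
      have := ih (c + 1) n (p ++ "?,") (by push_cast at h ⊢; omega)
      simp only [hc, if_false] at *
      rw [this]
      have hlen : (y :: ys).length ≠ 0 := by simp
      simp only [hlen, List.length_cons]
      have : (ys.length + 1 + 1 - 1) = (ys.length + 1 - 1) + 1 := by omega
      rw [this, strMul]
      simp [String.append_assoc]

-- bridging the two closed forms: "?,"*k ++ "?" = "?" ++ ",?"*k
theorem strMul_shift : ∀ k : Nat, strMul "?," k ++ "?" = "?" ++ strMul ",?" k := by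
  intro k
  induction k with
  | zero => decide
  | succ k ih =>
    show ("?," ++ strMul "?," k) ++ "?" = "?" ++ (",?" ++ strMul ",?" k)
    rw [String.append_assoc, ih]
    apply String.toList_injective
    simp [String.toList_append]

-- ===== VERDICT (by name: the statement is the Claim_ definition above) =====
theorem safely_add_subjects_spec : Claim_equal_safely_add_subjects := by
  intro subjects _
  unfold Spec_safely_add_subjects safely_add_subjects safely_add_subjects_alt
  simp only
  rw [foldA_char subjects 0 subjects.length "" (by omega)]
  cases h : subjects.length with
  | zero => simp
  | succ k =>
    simp only [Nat.succ_ne_zero, if_false, Nat.succ_sub_one]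
    rw [← strMul_shift k]
    simp [String.append_assoc]
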